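-- pv_equiv track=rewrite | github.com/Anandika-M/Wumpus-World-using-Bayesian-and-Proportional-logic | wumpus_propositional.py | arrowPath
-- ===== SOURCE A (Python) =====
-- GRID = 4
--
-- MOVE_DELTA = {"UP": (1, 0), "DOWN": (-1, 0), "LEFT": (0, -1), "RIGHT": (0, 1)}
--
-- def arrowPath(agentPos, direction):
--     r, c = agentPos
--     dr, dc = MOVE_DELTA[direction]
--     path, nr, nc = [], r + dr, c + dc
--     while 0 <= nr < GRID and 0 <= nc < GRID:
--         path.append((nr, nc))
--         nr += dr
--         nc += dc
--     return path
-- ===== SOURCE B (Python) =====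
-- GRID = 4
--
-- MOVE_DELTA = {"UP": (1, 0), "DOWN": (-1, 0), "LEFT": (0, -1), "RIGHT": (0, 1)}
--
-- def arrowPath(agentPos, direction):
--     r, c = agentPos
--     dr, dc = MOVE_DELTA[direction]
--     n = 0
--     if 0 <= r + dr < GRID and 0 <= c + dc < GRID:
--         # the first cell is on the grid, so the arrow flies straight to the wall
--         if dr > 0:
--             n = GRID - 1 - r
--         elif dr < 0:
--             n = r
--         elif dc > 0:
--             n = GRID - 1 - c
--         else:
--             n = c
--     return [(r + k * dr, c + k * dc) for k in range(1, n + 1)]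
-- ===== Notes on version B (the rewrite author's own statement) =====
-- stated objective: simpler
-- what changed: Replaces the per-step while loop with a single bounds check on the first cell followed by a closed-form distance-to-wall count and one range comprehension; Pre_ excludes unknown directions, on which A raises KeyError.
import Mathlib
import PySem

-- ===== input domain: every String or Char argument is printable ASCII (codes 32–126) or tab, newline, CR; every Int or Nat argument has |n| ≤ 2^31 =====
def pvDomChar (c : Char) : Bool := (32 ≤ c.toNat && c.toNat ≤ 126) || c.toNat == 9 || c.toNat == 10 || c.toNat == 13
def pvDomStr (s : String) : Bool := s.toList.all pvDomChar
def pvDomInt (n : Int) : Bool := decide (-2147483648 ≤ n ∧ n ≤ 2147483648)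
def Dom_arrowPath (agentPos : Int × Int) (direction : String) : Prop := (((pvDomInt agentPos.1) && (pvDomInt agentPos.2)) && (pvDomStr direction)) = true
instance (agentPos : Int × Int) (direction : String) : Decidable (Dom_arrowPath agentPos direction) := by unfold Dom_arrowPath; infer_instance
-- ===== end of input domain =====

-- B replaces A's per-step while loop by one bounds check on the first cell plus a closed-form
-- distance-to-wall count and a single range comprehension (objective: simpler).

-- ===== PORT A =====
def GRID : Int := 4

def MOVE_DELTA : PySem.Dict String (Int × Int) :=
  (((PySem.Dict.empty.insert "UP" (1, 0)).insert "DOWN" (-1, 0)).insert "LEFT" (0, -1)).insert "RIGHT" (0, 1)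

-- the while loop; each iteration moves one step, so on the four deltas it runs at most GRID = 4 times
def arrowPathLoop (fuel : Nat) (dr dc nr nc : Int) (path : List (Int × Int)) : List (Int × Int) :=
  match fuel with
  | 0 => path
  | fuel + 1 =>
    if 0 ≤ nr ∧ nr < GRID ∧ 0 ≤ nc ∧ nc < GRID then
      arrowPathLoop fuel dr dc (nr + dr) (nc + dc) (path ++ [(nr, nc)])
    else path

def arrowPath (agentPos : Int × Int) (direction : String) : List (Int × Int) :=
  let r := agentPos.1
  let c := agentPos.2
  match MOVE_DELTA.get? direction with
  | none => []  -- MOVE_DELTA[direction] raises KeyError: excluded by Pre_arrowPath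
  | some (dr, dc) => arrowPathLoop 4 dr dc (r + dr) (c + dc) []

-- ===== PORT B =====
def arrowPath_alt (agentPos : Int × Int) (direction : String) : List (Int × Int) :=
  let r := agentPos.1
  let c := agentPos.2
  match MOVE_DELTA.get? direction with
  | none => []  -- KeyError: excluded by Pre_arrowPath
  | some (dr, dc) =>
    let n : Int :=
      if 0 ≤ r + dr ∧ r + dr < GRID ∧ 0 ≤ c + dc ∧ c + dc < GRID then
        if dr > 0 then GRID - 1 - r
        else if dr < 0 then r
        else if dc > 0 then GRID - 1 - c
        else c
      else 0
    (PySem.List.pyRange 1 (n + 1) 1).map (fun k => (r + k * dr, c + k * dc))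

-- ===== PRECONDITION & SPEC =====
-- Pre_ excludes unknown directions, on which MOVE_DELTA[direction] raises KeyError in both programs.
def Pre_arrowPath (agentPos : Int × Int) (direction : String) : Prop :=
  direction = "UP" ∨ direction = "DOWN" ∨ direction = "LEFT" ∨ direction = "RIGHT"
instance (agentPos : Int × Int) (direction : String) : Decidable (Pre_arrowPath agentPos direction) := by
  unfold Pre_arrowPath; infer_instance

def pvWitness_arrowPath : (Int × Int) × String := ((1, 2), "UP")

def Spec_arrowPath (agentPos : Int × Int) (direction : String) (out : List (Int × Int)) : Prop := out = arrowPath_alt agentPos direction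
instance (agentPos : Int × Int) (direction : String) (out : List (Int × Int)) : Decidable (Spec_arrowPath agentPos direction out) := by unfold Spec_arrowPath; infer_instance

-- ===== CLAIM (what is proved, stated in full; the proofs are below) =====
def Claim_equal_arrowPath : Prop := ∀ (agentPos : Int × Int) (direction : String), Dom_arrowPath agentPos direction → Pre_arrowPath agentPos direction → Spec_arrowPath agentPos direction (arrowPath agentPos direction)

-- ===== LEMMAS AND PROOFS =====

lemma empty_side (n : Int) (hn : n = 0) (f : Int → Int × Int) :
    (PySem.List.pyRange 1 (n + 1) 1).map f = [] := by
  subst hn; simp [PySem.List.pyRange_one]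

lemma up_case (r c : Int) :
    arrowPathLoop 4 1 0 (r + 1) (c + 0) [] =
      (PySem.List.pyRange 1 ((if 0 ≤ r + 1 ∧ r + 1 < GRID ∧ 0 ≤ c + 0 ∧ c + 0 < GRID then GRID - 1 - r else 0) + 1) 1).map
        (fun k => (r + k * 1, c + k * 0)) := by
  by_cases h : 0 ≤ r + 1 ∧ r + 1 < GRID ∧ 0 ≤ c + 0 ∧ c + 0 < GRID
  · rw [if_pos h]
    simp only [GRID] at h
    obtain ⟨h1, h2, h3, h4⟩ := h
    have hc1 : 0 ≤ c := by omega
    have hc2 : c < 4 := by omega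
    rcases (show r = -1 ∨ r = 0 ∨ r = 1 ∨ r = 2 by omega) with h | h | h | h <;>
      subst h <;>
      simp [arrowPathLoop, GRID, hc1, hc2, PySem.List.pyRange_one, List.range_succ] <;> omega
  · rw [if_neg h, empty_side _ rfl, arrowPathLoop, if_neg (by simpa [GRID] using h)]

lemma down_case (r c : Int) :
    arrowPathLoop 4 (-1) 0 (r + -1) (c + 0) [] =
      (PySem.List.pyRange 1 ((if 0 ≤ r + -1 ∧ r + -1 < GRID ∧ 0 ≤ c + 0 ∧ c + 0 < GRID then r else 0) + 1) 1).map
        (fun k => (r + k * -1, c + k * 0)) := by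
  by_cases h : 0 ≤ r + -1 ∧ r + -1 < GRID ∧ 0 ≤ c + 0 ∧ c + 0 < GRID
  · rw [if_pos h]
    simp only [GRID] at h
    obtain ⟨h1, h2, h3, h4⟩ := h
    have hc1 : 0 ≤ c := by omega
    have hc2 : c < 4 := by omega
    rcases (show r = 1 ∨ r = 2 ∨ r = 3 ∨ r = 4 by omega) with h | h | h | h <;>
      subst h <;>
      simp [arrowPathLoop, GRID, hc1, hc2, PySem.List.pyRange_one, List.range_succ] <;> omega
  · rw [if_neg h, empty_side _ rfl, arrowPathLoop, if_neg (by simpa [GRID] using h)]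

lemma right_case (r c : Int) :
    arrowPathLoop 4 0 1 (r + 0) (c + 1) [] =
      (PySem.List.pyRange 1 ((if 0 ≤ r + 0 ∧ r + 0 < GRID ∧ 0 ≤ c + 1 ∧ c + 1 < GRID then GRID - 1 - c else 0) + 1) 1).map
        (fun k => (r + k * 0, c + k * 1)) := by
  by_cases h : 0 ≤ r + 0 ∧ r + 0 < GRID ∧ 0 ≤ c + 1 ∧ c + 1 < GRID
  · rw [if_pos h]
    simp only [GRID] at h
    obtain ⟨h1, h2, h3, h4⟩ := h
    have hr1 : 0 ≤ r := by omega
    have hr2 : r < 4 := by omega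
    rcases (show c = -1 ∨ c = 0 ∨ c = 1 ∨ c = 2 by omega) with h | h | h | h <;>
      subst h <;>
      simp [arrowPathLoop, GRID, hr1, hr2, PySem.List.pyRange_one, List.range_succ] <;> omega
  · rw [if_neg h, empty_side _ rfl, arrowPathLoop, if_neg (by simpa [GRID] using h)]

lemma left_case (r c : Int) :
    arrowPathLoop 4 0 (-1) (r + 0) (c + -1) [] =
      (PySem.List.pyRange 1 ((if 0 ≤ r + 0 ∧ r + 0 < GRID ∧ 0 ≤ c + -1 ∧ c + -1 < GRID then c else 0) + 1) 1).map
        (fun k => (r + k * 0, c + k * -1)) := by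
  by_cases h : 0 ≤ r + 0 ∧ r + 0 < GRID ∧ 0 ≤ c + -1 ∧ c + -1 < GRID
  · rw [if_pos h]
    simp only [GRID] at h
    obtain ⟨h1, h2, h3, h4⟩ := h
    have hr1 : 0 ≤ r := by omega
    have hr2 : r < 4 := by omega
    rcases (show c = 1 ∨ c = 2 ∨ c = 3 ∨ c = 4 by omega) with h | h | h | h <;>
      subst h <;>
      simp [arrowPathLoop, GRID, hr1, hr2, PySem.List.pyRange_one, List.range_succ] <;> omega
  · rw [if_neg h, empty_side _ rfl, arrowPathLoop, if_neg (by simpa [GRID] using h)]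

-- ===== VERDICT (by name: the statement is the Claim_ definition above) =====
theorem arrowPath_spec : Claim_equal_arrowPath := by
  intro ⟨r, c⟩ direction _hdom hpre
  unfold Spec_arrowPath arrowPath arrowPath_alt
  rcases hpre with h | h | h | h <;> subst h
  · rw [show MOVE_DELTA.get? "UP" = some ((1 : Int), (0 : Int)) from rfl]
    norm_num
    simpa using up_case r c
  · rw [show MOVE_DELTA.get? "DOWN" = some ((-1 : Int), (0 : Int)) from rfl]
    norm_num
    simpa using down_case r c
  · rw [show MOVE_DELTA.get? "LEFT" = some ((0 : Int), (-1 : Int)) from rfl]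
    norm_num
    simpa using left_case r c
  · rw [show MOVE_DELTA.get? "RIGHT" = some ((0 : Int), (1 : Int)) from rfl]
    norm_num
    simpa using right_case r c
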